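-- pv_equiv track=rewrite | github.com/elianbeyer/vigenere | main.py | __mk_table
-- ===== SOURCE A (Python) =====
-- def __mk_table(alphabet):
--     """
--     Creates a vigenere table.
--
--     :param alphabet: Alphabet used to create table
--     :type alphabet: List
--
--     :return: vigenere table
--     :rtype: dict{ String: dict{ String: String } }
--     """
--     keys = alphabet.copy()
--
--     def shift_elms(lst, n):
--         n = n % len(lst)
--         return lst[n:] + lst[:n]
--
--     high_lvl = {}  # 1-lvl nested dictionary
--     for e, key in enumerate(keys):
--         high_lvl[key] = dict(zip(keys, shift_elms(alphabet, e)))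
--
--     return high_lvl
-- ===== SOURCE B (Python) =====
-- def __mk_table(alphabet):
--     keys = alphabet.copy()
--     row_vals = alphabet.copy()
--     high_lvl = {}
--     for key in keys:
--         high_lvl[key] = dict(zip(keys, row_vals))
--         row_vals.append(row_vals.pop(0))
--     return high_lvl
-- ===== Notes on version B (the rewrite author's own statement) =====
-- stated objective: alternative
-- what changed: Instead of recomputing each row's rotation from scratch with modular slicing (shift_elms), B keeps one mutable row buffer and rotates it incrementally by one position per iteration (pop the head, append it), so the shift amount and the modulo disappear entirely.
import Mathlib
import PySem

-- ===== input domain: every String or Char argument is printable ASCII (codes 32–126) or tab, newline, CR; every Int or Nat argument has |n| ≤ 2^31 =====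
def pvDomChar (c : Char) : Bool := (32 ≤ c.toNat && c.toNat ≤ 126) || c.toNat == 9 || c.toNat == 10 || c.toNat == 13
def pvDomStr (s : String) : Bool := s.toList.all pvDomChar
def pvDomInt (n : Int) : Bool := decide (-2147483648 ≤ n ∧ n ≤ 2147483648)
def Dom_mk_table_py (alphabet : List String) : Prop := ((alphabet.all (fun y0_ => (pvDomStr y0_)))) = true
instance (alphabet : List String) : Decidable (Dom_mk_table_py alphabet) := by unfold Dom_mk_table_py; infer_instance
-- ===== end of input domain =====

-- B replaces A's per-row modular slicing (shift_elms) by one row buffer rotated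
-- incrementally by a single position per iteration (pop head, append) — alternative, same cost.

-- ===== PORT A =====
-- shift_elms(lst, n) = lst[n % len(lst):] + lst[:n % len(lst)]
def pvShiftElms (lst : List String) (n : Int) : List String :=
  let n := PySem.Int.mod n (lst.length : Int)
  PySem.List.slice lst (some n) none ++ PySem.List.slice lst none (some n)

def mk_table_py (alphabet : List String) : List (String × List (String × String)) :=
  let keys := alphabet
  let high_lvl : PySem.Dict String (PySem.Dict String String) :=
    (PySem.List.enumerate keys).foldl
      (fun d p => d.insert p.2 (PySem.Dict.ofList (keys.zip (pvShiftElms alphabet p.1))))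
      PySem.Dict.empty
  high_lvl.items.map (fun p => (p.1, p.2.items))

-- ===== PORT B =====
-- row_vals.append(row_vals.pop(0)): rotate the buffer left by one (buffer is nonempty in every iteration)
def pvRot1 (l : List String) : List String :=
  match l with
  | [] => []
  | v :: vs => vs ++ [v]

def mk_table_py_alt (alphabet : List String) : List (String × List (String × String)) :=
  let keys := alphabet
  let st :=
    keys.foldl
      (fun (st : PySem.Dict String (PySem.Dict String String) × List String) key =>
        (st.1.insert key (PySem.Dict.ofList (keys.zip st.2)), pvRot1 st.2))
      (PySem.Dict.empty, alphabet)
  st.1.items.map (fun p => (p.1, p.2.items))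

-- ===== PRECONDITION & SPEC =====
def Spec_mk_table_py (alphabet : List String) (out : List (String × List (String × String))) : Prop := out = mk_table_py_alt alphabet
instance (alphabet : List String) (out : List (String × List (String × String))) : Decidable (Spec_mk_table_py alphabet out) := by unfold Spec_mk_table_py; infer_instance

-- ===== CLAIM (what is proved, stated in full; the proofs are below) =====
def Claim_equal_mk_table_py : Prop := ∀ (alphabet : List String), Dom_mk_table_py alphabet → Spec_mk_table_py alphabet (mk_table_py alphabet)

-- ===== LEMMAS AND PROOFS =====

-- pvRot1 is List.rotate by one
theorem pvRot1_eq_rotate (l : List String) : pvRot1 l = l.rotate 1 := by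
  cases l with
  | nil => rfl
  | cons v vs => simp [pvRot1, List.rotate_cons_succ]

-- A's shift by e (0 ≤ e < n) is List.rotate e
theorem pvShiftElms_eq_rotate (alphabet : List String) (e : Nat) (he : e < alphabet.length) :
    pvShiftElms alphabet (e : Int) = alphabet.rotate e := by
  simp only [pvShiftElms]
  rw [PySem.Int.mod_natCast, Nat.mod_eq_of_lt he,
      PySem.List.slice_from_natCast, PySem.List.slice_to_natCast,
      List.rotate_eq_drop_append_take (Nat.le_of_lt he)]

-- loop invariant: folding A's enumerated suffix from index e equals folding B's
-- suffix with buffer alphabet.rotate e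
theorem pv_fold_inv (alphabet : List String) (ks : List String) (e : Nat)
    (d : PySem.Dict String (PySem.Dict String String))
    (hbound : e + ks.length = alphabet.length) :
    (PySem.List.enumerate ks (e : Int)).foldl
      (fun d p => d.insert p.2 (PySem.Dict.ofList (alphabet.zip (pvShiftElms alphabet p.1)))) d
    =
    (ks.foldl
      (fun (st : PySem.Dict String (PySem.Dict String String) × List String) key =>
        (st.1.insert key (PySem.Dict.ofList (alphabet.zip st.2)), pvRot1 st.2))
      (d, alphabet.rotate e)).1 := by
  induction ks generalizing e d with
  | nil => simp [PySem.List.enumerate_nil]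
  | cons k ks ih =>
      rw [PySem.List.enumerate_cons]
      simp only [List.foldl_cons]
      have he : e < alphabet.length := by simp at hbound; omega
      have h1 : pvShiftElms alphabet (e : Int) = alphabet.rotate e :=
        pvShiftElms_eq_rotate alphabet e he
      have h2 : pvRot1 (alphabet.rotate e) = alphabet.rotate (e + 1) := by
        rw [pvRot1_eq_rotate, List.rotate_rotate]
      have h3 : ((e : Int) + 1) = ((e + 1 : Nat) : Int) := by push_cast; ring
      rw [h1, h2, h3, ih (e + 1) _ (by simp at hbound ⊢; omega)]

theorem pv_main (alphabet : List String) : mk_table_py alphabet = mk_table_py_alt alphabet := by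
  unfold mk_table_py mk_table_py_alt
  simp only
  have h := pv_fold_inv alphabet alphabet 0 PySem.Dict.empty (by omega)
  norm_num [List.rotate_zero] at h
  rw [h]

-- ===== VERDICT (by name: the statement is the Claim_ definition above) =====
theorem mk_table_py_spec : Claim_equal_mk_table_py := by
  intro alphabet _
  unfold Spec_mk_table_py
  exact pv_main alphabet
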